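-- pv_equiv track=rewrite | github.com/ook-lab/document-management-system | shared/pipeline/stage_g/g12_table_ai_processor.py | _build_col_map
-- ===== SOURCE A (Python) =====
-- from typing import Dict, Any, List, Optional, Tuple
--
-- def _build_col_map(filled_headers: Dict[str, List]) -> Dict[int, Dict]:
--     """
--     各列の座標マップを構築
--     {col_index: {meaning: value, ...}}
--     """
--     if not filled_headers:
--         return {}
--
--     col_count = max((len(v) for v in filled_headers.values()), default=0)
--     col_map = {}
--
--     for col_idx in range(col_count):
--         coord = {}
--         for meaning, row in filled_headers.items():
--             if col_idx < len(row) and row[col_idx] is not None: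
--                 coord[meaning] = row[col_idx]
--         col_map[col_idx] = coord
--
--     return col_map
-- ===== SOURCE B (Python) =====
-- def _build_col_map(filled_headers):
--     """
--     各列の座標マップを構築
--     {col_index: {meaning: value, ...}}
--     """
--     if not filled_headers:
--         return {}
--
--     col_count = max((len(row) for row in filled_headers.values()), default=0)
--     col_map = {i: {} for i in range(col_count)}
--
--     for meaning, row in filled_headers.items():
--         for idx, value in enumerate(row):
--             if value is not None:
--                 col_map[idx][meaning] = value
--
--     return col_map
-- ===== Notes on version B (the rewrite author's own statement) =====
-- stated objective: alternative
-- what changed: Inverts the loop nest: instead of scanning every header row once per column index, B pre-seeds one empty dict per column and makes a single pass over the header rows, enumerating only the actual entries and writing non-None values into the pre-seeded per-column dicts.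
import Mathlib
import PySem

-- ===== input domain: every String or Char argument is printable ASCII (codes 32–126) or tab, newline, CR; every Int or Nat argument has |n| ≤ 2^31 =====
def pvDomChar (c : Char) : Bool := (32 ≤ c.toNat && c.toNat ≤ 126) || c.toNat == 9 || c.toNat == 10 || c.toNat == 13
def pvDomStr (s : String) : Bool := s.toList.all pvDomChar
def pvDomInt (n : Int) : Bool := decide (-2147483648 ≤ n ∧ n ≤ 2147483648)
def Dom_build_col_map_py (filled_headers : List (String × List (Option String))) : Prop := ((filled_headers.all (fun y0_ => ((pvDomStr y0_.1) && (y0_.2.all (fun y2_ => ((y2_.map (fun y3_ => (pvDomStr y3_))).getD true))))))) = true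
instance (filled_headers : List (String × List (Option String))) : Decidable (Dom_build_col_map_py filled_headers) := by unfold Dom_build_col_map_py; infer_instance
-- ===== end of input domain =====

-- B inverts A's column-major nested scan into one row-major pass over the actual
-- entries, writing into pre-seeded per-column dicts (objective: alternative).
-- The Python dicts keyed by 0..col_count-1 are represented positionally
-- (a list of per-column dicts, emitted with their indices at the end) —
-- faithful, since both Pythons create the integer keys exactly in range order.

-- ===== PORT A =====
def build_col_map_py (filled_headers : List (String × List (Option String))) : List (Int × List (String × String)) :=
  if filled_headers = [] then []
  else
    let col_count : Nat := (filled_headers.map (fun p => p.2.length)).foldl max 0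
    -- for col_idx in range(col_count): build coord, append under the fresh key col_idx
    (List.range col_count).foldl
      (fun col_map (col_idx : Nat) =>
        let coord : PySem.Dict String String :=
          filled_headers.foldl
            (fun c p =>
              match p.2[col_idx]? with         -- col_idx < len(row) and row[col_idx] is not None
              | some (some v) => c.insert p.1 v
              | _ => c)
            PySem.Dict.empty
        col_map ++ [((col_idx : Int), coord.items)])
      []

-- ===== PORT B =====
-- inner loop of B: 'for idx, value in enumerate(row): if value is not None: col_map[idx][meaning] = value'
def bcmAltRow (meaning : String) : Nat → List (Option String) → List (PySem.Dict String String) → List (PySem.Dict String String)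
  | _, [], cols => cols
  | idx, none :: rest, cols => bcmAltRow meaning (idx + 1) rest cols
  | idx, some v :: rest, cols => bcmAltRow meaning (idx + 1) rest (cols.modify idx (fun d => d.insert meaning v))

def build_col_map_py_alt (filled_headers : List (String × List (Option String))) : List (Int × List (String × String)) :=
  if filled_headers = [] then []
  else
    let col_count : Nat := (filled_headers.map (fun p => p.2.length)).foldl max 0
    -- col_map = {i: {} for i in range(col_count)}, kept positionally
    let cols : List (PySem.Dict String String) :=
      filled_headers.foldl (fun cols p => bcmAltRow p.1 0 p.2 cols)
        (List.replicate col_count PySem.Dict.empty)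
    (List.range col_count).map (fun (i : Nat) => ((i : Int), (cols.getD i PySem.Dict.empty).items))

-- ===== PRECONDITION & SPEC =====
def Spec_build_col_map_py (filled_headers : List (String × List (Option String))) (out : List (Int × List (String × String))) : Prop := out = build_col_map_py_alt filled_headers
instance (filled_headers : List (String × List (Option String))) (out : List (Int × List (String × String))) : Decidable (Spec_build_col_map_py filled_headers out) := by unfold Spec_build_col_map_py; infer_instance

-- ===== CLAIM (what is proved, stated in full; the proofs are below) =====
def Claim_equal_build_col_map_py : Prop := ∀ (filled_headers : List (String × List (Option String))), Dom_build_col_map_py filled_headers → Spec_build_col_map_py filled_headers (build_col_map_py filled_headers)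

-- ===== LEMMAS AND PROOFS =====

-- B's row pass never touches a column below its running index
theorem bcmAltRow_getElem?_lt (meaning : String) (row : List (Option String)) (idx j : Nat)
    (cols : List (PySem.Dict String String)) (hj : j < idx) :
    (bcmAltRow meaning idx row cols)[j]? = cols[j]? := by
  induction row generalizing idx cols with
  | nil => simp [bcmAltRow]
  | cons hd tl ih =>
    cases hd with
    | none => rw [bcmAltRow, ih (idx + 1) cols (by omega)]
    | some v =>
      rw [bcmAltRow, ih (idx + 1) _ (by omega), List.getElem?_modify]
      simp [Nat.ne_of_gt hj]

-- the per-row B pass, observed at one column j: it is A's per-row step for column j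
theorem bcmAltRow_getElem? (meaning : String) (row : List (Option String)) (idx j : Nat)
    (cols : List (PySem.Dict String String)) (hj : idx ≤ j) :
    (bcmAltRow meaning idx row cols)[j]? =
      (match row[j - idx]? with
       | some (some v) => cols[j]?.map (fun d => d.insert meaning v)
       | _ => cols[j]?) := by
  induction row generalizing idx cols with
  | nil => simp [bcmAltRow]
  | cons hd tl ih =>
    rcases Nat.lt_or_ge idx j with hlt | hge
    · have hij : idx + 1 ≤ j := hlt
      have hsub : j - idx = (j - (idx + 1)) + 1 := by omega
      cases hd with
      | none =>
        rw [bcmAltRow, ih (idx + 1) cols hij, hsub]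
        simp
      | some v =>
        rw [bcmAltRow, ih (idx + 1) _ hij, hsub]
        have hmod : (cols.modify idx (fun d => d.insert meaning v))[j]? = cols[j]? := by
          rw [List.getElem?_modify]
          simp [Nat.ne_of_lt hlt]
        simp [hmod]
    · have hje : j = idx := le_antisymm hge hj
      subst hje
      cases hd with
      | none =>
        rw [bcmAltRow, bcmAltRow_getElem?_lt meaning tl (j + 1) j cols (by omega)]
        simp
      | some v =>
        rw [bcmAltRow, bcmAltRow_getElem?_lt meaning tl (j + 1) j _ (by omega),
          List.getElem?_modify]
        simp

-- A's per-column step, as a function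
def bcmStepA (j : Nat) (c : PySem.Dict String String) (p : String × List (Option String)) :
    PySem.Dict String String :=
  match p.2[j]? with
  | some (some v) => c.insert p.1 v
  | _ => c

theorem bcmFold_getElem? (fh : List (String × List (Option String)))
    (cols : List (PySem.Dict String String)) (j : Nat) :
    (fh.foldl (fun cols p => bcmAltRow p.1 0 p.2 cols) cols)[j]? =
      cols[j]?.map (fun d => fh.foldl (bcmStepA j) d) := by
  induction fh generalizing cols with
  | nil => cases h : cols[j]? <;> simp [h]
  | cons hd tl ih =>
    rw [List.foldl_cons, ih]
    have hrow := bcmAltRow_getElem? hd.1 hd.2 0 j cols (Nat.zero_le j)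
    rw [Nat.sub_zero] at hrow
    rw [hrow]
    unfold bcmStepA
    cases h : hd.2[j]? with
    | none => simp [h]
    | some o =>
      cases o with
      | none => simp [h]
      | some v =>
        cases cols[j]? <;> simp [h]

theorem foldl_append_singleton {α β : Type} (l : List α) (f : α → β) (acc : List β) :
    l.foldl (fun acc x => acc ++ [f x]) acc = acc ++ l.map f := by
  induction l generalizing acc with
  | nil => simp
  | cons hd tl ih => simp [ih]

-- ===== VERDICT (by name: the statement is the Claim_ definition above) =====
theorem build_col_map_py_spec : Claim_equal_build_col_map_py := by
  intro fh _
  unfold Spec_build_col_map_py build_col_map_py build_col_map_py_alt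
  by_cases h : fh = []
  · simp [h]
  · simp only [h, if_false]
    set n : Nat := (fh.map (fun p => p.2.length)).foldl max 0 with hn
    rw [foldl_append_singleton]
    simp only [List.nil_append]
    apply List.map_congr_left
    intro i hi
    have hi' : i < n := List.mem_range.mp hi
    have hlen : (List.replicate n (PySem.Dict.empty : PySem.Dict String String)).length = n := by simp
    have hget := bcmFold_getElem? fh (List.replicate n PySem.Dict.empty) i
    have hrep : (List.replicate n (PySem.Dict.empty : PySem.Dict String String))[i]? =
        some PySem.Dict.empty := by
      simp [hi']
    rw [hrep] at hget
    simp only [Option.map_some] at hget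
    have : (fh.foldl (fun cols p => bcmAltRow p.1 0 p.2 cols)
        (List.replicate n PySem.Dict.empty)).getD i PySem.Dict.empty =
        fh.foldl (bcmStepA i) PySem.Dict.empty := by
      rw [List.getD_eq_getElem?_getD, hget]; rfl
    rw [this]
    rfl
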